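-- pv_equiv track=rewrite | github.com/stnxo2023/garak | garak/probes/badchars.py | _inject_sequences
-- ===== SOURCE A (Python) =====
-- from typing import Iterator, List, Sequence, Tuple
--
-- def _inject_sequences(payload: str, insertions: List[Tuple[int, str]]) -> str:
--     result = payload
--     offset = 0
--     for position, value in sorted(insertions, key=lambda item: item[0]):
--         idx = min(max(position + offset, 0), len(result))
--         result = result[:idx] + value + result[idx:]
--         offset += len(value)
--     return result
-- ===== SOURCE B (Python) =====
-- from typing import List, Tuple
--
-- def _inject_sequences(payload: str, insertions: List[Tuple[int, str]]) -> str: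
--     # One pass over the sorted insertions: clamp each position into the payload,
--     # collect payload fragments and values as pieces, join once at the end.
--     n = len(payload)
--     pieces = []
--     prev = 0
--     for pos, val in sorted(insertions, key=lambda item: item[0]):
--         idx = min(max(pos, 0), n)
--         pieces.append(payload[prev:idx])
--         pieces.append(val)
--         prev = idx
--     pieces.append(payload[prev:])
--     return "".join(pieces)
-- ===== Notes on version B (the rewrite author's own statement) =====
-- stated objective: faster
-- what changed: Instead of re-copying the whole result string (slice+concat) for every insertion with a running offset, B sorts once, clamps each position into the payload and collects payload fragments and inserted values as pieces joined once at the end.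
-- intended difference: When two or more insertions have a negative position and a nonempty value, A splices the later front-insertions inside the text inserted by the earlier ones (its offset has grown before clamping, e.g. A gives 'acbx' on the witness), while B places all front-insertions before the payload in sorted order ('abcx'), the intended reading of inserting at max(pos,0). — e.g. on _inject_sequences("x", [(-2, "ab"), (-1, "c")]): A returns "acbx", B returns "abcx"
import Mathlib
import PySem

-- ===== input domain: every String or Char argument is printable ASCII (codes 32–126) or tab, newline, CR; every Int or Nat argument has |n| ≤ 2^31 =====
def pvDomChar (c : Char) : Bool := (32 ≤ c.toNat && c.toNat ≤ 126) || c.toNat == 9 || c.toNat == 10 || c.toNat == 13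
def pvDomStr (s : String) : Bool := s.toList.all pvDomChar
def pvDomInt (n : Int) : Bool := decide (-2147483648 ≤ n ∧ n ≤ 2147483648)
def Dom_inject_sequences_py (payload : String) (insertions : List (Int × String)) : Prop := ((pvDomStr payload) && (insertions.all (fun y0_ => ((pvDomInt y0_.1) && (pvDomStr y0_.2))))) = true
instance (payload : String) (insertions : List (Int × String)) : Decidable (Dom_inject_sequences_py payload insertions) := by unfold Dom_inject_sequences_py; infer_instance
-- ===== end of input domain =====

-- B sorts once, clamps each position into the payload and joins the pieces once, instead of
-- re-copying the whole string per insertion; A = B except where several insertions have negative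
-- positions (see D_ below), where A splices later front-insertions inside earlier inserted text.

-- ===== PORT A =====
-- loop body of A: result = result[:idx] + value + result[idx:]; offset += len(value)
def pvStepA (st : List Char × Int) (pv : Int × String) : List Char × Int :=
  let idx := min (max (pv.1 + st.2) 0) ((st.1.length : Int))
  (PySem.List.slice st.1 none (some idx) ++ pv.2.toList ++ PySem.List.slice st.1 (some idx) none,
   st.2 + (pv.2.toList.length : Int))

def inject_sequences_py (payload : String) (insertions : List (Int × String)) : String :=
  String.ofList
    (((PySem.List.sorted insertions (fun item => item.1) false).foldl pvStepA
        (payload.toList, 0)).1)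

-- ===== PORT B =====
-- loop body of B over state (pieces, prev): idx = min(max(pos,0),n);
-- pieces += [payload[prev:idx], val]; prev = idx
def pvStepB (cs : List Char) (st : List (List Char) × Int) (pv : Int × String) :
    List (List Char) × Int :=
  let idx := min (max pv.1 0) ((cs.length : Int))
  (st.1 ++ [PySem.List.slice cs (some st.2) (some idx), pv.2.toList], idx)

def inject_sequences_py_alt (payload : String) (insertions : List (Int × String)) : String :=
  let cs := payload.toList
  let st := (PySem.List.sorted insertions (fun item => item.1) false).foldl (pvStepB cs) ([], 0)
  -- pieces.append(payload[prev:]); return "".join(pieces)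
  String.ofList ((st.1 ++ [PySem.List.slice cs (some st.2) none]).flatten)

-- ===== PRECONDITION & SPEC =====
-- When two or more insertions carry a negative position and a nonempty value, A returns a string
-- in which the later front-insertions are spliced INSIDE the text inserted by the earlier ones (an
-- artefact of clamping pos+offset after offset has grown), while B puts all front-insertions before
-- the payload in sorted order, which is the intended reading of "insert at position max(pos,0)".
def D_inject_sequences_py (payload : String) (insertions : List (Int × String)) : Prop :=
  2 ≤ (insertions.filter (fun x => decide (x.1 < 0) && decide (x.2 ≠ ""))).length
instance (payload : String) (insertions : List (Int × String)) : Decidable (D_inject_sequences_py payload insertions) := by unfold D_inject_sequences_py; infer_instance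

def Spec_inject_sequences_py (payload : String) (insertions : List (Int × String)) (out : String) : Prop := ¬ D_inject_sequences_py payload insertions → out = inject_sequences_py_alt payload insertions
instance (payload : String) (insertions : List (Int × String)) (out : String) : Decidable (Spec_inject_sequences_py payload insertions out) := by unfold Spec_inject_sequences_py; infer_instance

def pvDiffWitness_inject_sequences_py : String × (List (Int × String)) := ("x", [(-2, "ab"), (-1, "c")])
def pvDiffWitnessOut_inject_sequences_py : String × String := ("acbx", "abcx")

-- ===== CLAIM (what is proved, stated in full; the proofs are below) =====
def Claim_unchanged_inject_sequences_py : Prop := ∀ (payload : String) (insertions : List (Int × String)), Dom_inject_sequences_py payload insertions → Spec_inject_sequences_py payload insertions (inject_sequences_py payload insertions)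
def Claim_changed_inject_sequences_py : Prop := Dom_inject_sequences_py (pvDiffWitness_inject_sequences_py.1) (pvDiffWitness_inject_sequences_py.2) ∧ D_inject_sequences_py (pvDiffWitness_inject_sequences_py.1) (pvDiffWitness_inject_sequences_py.2) ∧ inject_sequences_py (pvDiffWitness_inject_sequences_py.1) (pvDiffWitness_inject_sequences_py.2) = pvDiffWitnessOut_inject_sequences_py.1 ∧ inject_sequences_py_alt (pvDiffWitness_inject_sequences_py.1) (pvDiffWitness_inject_sequences_py.2) = pvDiffWitnessOut_inject_sequences_py.2 ∧ pvDiffWitnessOut_inject_sequences_py.1 ≠ pvDiffWitnessOut_inject_sequences_py.2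

-- ===== LEMMAS AND PROOFS =====

-- The fold invariant relating A's state (result, offset) to B's state (pieces, prev):
--   result = pieces.flatten ++ (payload dropped to prev),  offset = pieces.flatten.length - prev,
-- under: positions sorted; prev ≤ every remaining clamped position; at most one remaining
-- negative-position nonempty-value insertion, and if one remains nothing was inserted yet.
lemma pv_inv (cs : List Char) : ∀ (l : List (Int × String)),
    l.Pairwise (fun a b => a.1 ≤ b.1) →
    ∀ (pieces : List (List Char)) (p : Nat),
    p ≤ cs.length →
    p ≤ pieces.flatten.length →
    (∀ x ∈ l, (p : Int) ≤ min (max x.1 0) (cs.length : Int)) →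
    (l.filter (fun x => decide (x.1 < 0) && decide (x.2 ≠ ""))).length ≤ 1 →
    (∀ x ∈ l, x.1 < 0 → x.2 ≠ "" → pieces.flatten.length = p) →
    (l.foldl pvStepA (pieces.flatten ++ cs.drop p, (pieces.flatten.length : Int) - p)).1
      = (((l.foldl (pvStepB cs) (pieces, (p : Int))).1
          ++ [PySem.List.slice cs (some (l.foldl (pvStepB cs) (pieces, (p : Int))).2) none]).flatten) := by
  intro l
  induction l with
  | nil =>
    intro _ pieces p _ _ _ _ _
    simp [PySem.List.slice_from_natCast]
  | cons hd t ih =>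
    intro hpw pieces p hp hpl h1 hcnt hoff
    obtain ⟨pos, v⟩ := hd
    obtain ⟨hhd, hpt⟩ := List.pairwise_cons.mp hpw
    have hp0x := h1 (pos, v) (by simp)
    simp only [List.foldl_cons]
    by_cases hneg : pos < 0
    · -- negative position: p = 0
      have hp0 : p = 0 := by simp at hp0x; omega
      subst hp0
      simp only [Nat.cast_zero]
      have hsB : pvStepB cs (pieces, (0 : Int)) (pos, v)
          = (pieces ++ [[], v.toList], 0) := by
        simp only [pvStepB]
        rw [show min (max pos 0) ((cs.length : Int)) = 0 by omega]
        rw [PySem.List.slice_toNat cs (by omega) (by omega)]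
        simp
      by_cases hv : v = ""
      · -- empty value: a no-op on both sides
        subst hv
        have hsA : pvStepA (pieces.flatten ++ cs.drop 0, (pieces.flatten.length : Int) - 0) (pos, "")
            = (pieces.flatten ++ cs.drop 0, (pieces.flatten.length : Int) - 0) := by
          simp only [pvStepA]
          set idx : Int := min (max (pos + ((pieces.flatten.length : Int) - 0)) 0)
            (((pieces.flatten ++ cs.drop 0).length : Int)) with hidx
          have h0i : 0 ≤ idx := le_min (le_max_right _ _) (by positivity)
          rw [PySem.List.slice_to _ h0i, PySem.List.slice_from _ h0i]
          simp
        rw [hsA, hsB]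
        have := ih hpt (pieces ++ [[], "".toList]) 0 (by omega) (by simp)
          (fun x hx => h1 x (by simp [hx]))
          (by simp only [List.filter_cons] at hcnt
              rw [if_neg (by simp)] at hcnt
              exact hcnt)
          (fun x hx h2 h3 => by
            have := hoff x (by simp [hx]) h2 h3; simpa using this)
        simpa using this
      · -- nonempty value at a negative position: nothing inserted yet (pieces.flatten = [])
        have hfl : pieces.flatten = [] := by
          have := hoff (pos, v) (by simp) hneg hv
          exact List.eq_nil_of_length_eq_zero this
        have hsA : pvStepA (pieces.flatten ++ cs.drop 0, (pieces.flatten.length : Int) - 0) (pos, v)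
            = (v.toList ++ cs, (v.toList.length : Int)) := by
          simp only [pvStepA, hfl]
          rw [show min (max (pos + (((List.nil (α := Char)).length : Int) - 0)) 0)
              ((((List.nil (α := Char)) ++ cs.drop 0).length : Int)) = 0 by simp; omega]
          rw [PySem.List.slice_to _ (by omega), PySem.List.slice_from _ (by omega)]
          simp
        rw [hsA, hsB]
        have hnone : ∀ x ∈ t, ¬ (x.1 < 0 ∧ x.2 ≠ "") := by
          intro x hx hx2
          have h3 : x ∈ t.filter (fun x => decide (x.1 < 0) && decide (x.2 ≠ "")) :=
            List.mem_filter.mpr ⟨hx, by simp [hx2.1, hx2.2]⟩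
          have h4 := List.length_pos_of_mem h3
          simp only [List.filter_cons] at hcnt
          rw [if_pos (by simp [hneg, hv])] at hcnt
          simp only [List.length_cons] at hcnt
          omega
        have hft : t.filter (fun x => decide (x.1 < 0) && decide (x.2 ≠ "")) = [] :=
          List.filter_eq_nil_iff.mpr (fun x hx => by
            simp only [Bool.and_eq_true, decide_eq_true_eq, not_and]
            exact fun h2 h3 => hnone x hx ⟨h2, by simpa using h3⟩)
        have := ih hpt (pieces ++ [[], v.toList]) 0 (by omega) (by simp)
          (fun x hx => h1 x (by simp [hx]))
          (by rw [hft]; simp)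
          (fun x hx h2 h3 => absurd ⟨h2, h3⟩ (hnone x hx))
        simpa [hfl] using this
    · -- nonnegative position: insertion lands at the clamped payload index k
      rw [not_lt] at hneg
      set k : Nat := min pos.toNat cs.length with hkdef
      have hk : (k : Int) = min (max pos 0) ((cs.length : Int)) := by omega
      have hp0x' : (p : Int) ≤ min (max pos 0) ((cs.length : Int)) := hp0x
      have hpk : p ≤ k := by omega
      have hkn : k ≤ cs.length := by omega
      have hsB : pvStepB cs (pieces, ((p : Nat) : Int)) (pos, v)
          = (pieces ++ [(cs.drop p).take (k - p), v.toList], (k : Int)) := by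
        simp only [pvStepB]
        rw [← hk, PySem.List.slice_natCast]
      have hsA : pvStepA (pieces.flatten ++ cs.drop p, (pieces.flatten.length : Int) - p) (pos, v)
          = ((pieces ++ [(cs.drop p).take (k - p), v.toList]).flatten ++ cs.drop k,
             (((pieces ++ [(cs.drop p).take (k - p), v.toList]).flatten.length : Int)) - k) := by
        simp only [pvStepA]
        rw [show min (max (pos + ((pieces.flatten.length : Int) - p)) 0)
              (((pieces.flatten ++ cs.drop p).length : Int))
            = ((pieces.flatten.length + (k - p) : Nat) : Int) by
          simp only [List.length_append, List.length_drop]; push_cast; omega]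
        rw [PySem.List.slice_to_natCast, PySem.List.slice_from_natCast,
          List.take_length_add_append, List.drop_length_add_append,
          List.drop_drop, show p + (k - p) = k by omega]
        simp only [Prod.mk.injEq]
        constructor
        · simp [List.append_assoc]
        · have hlen : ((cs.drop p).take (k - p)).length = k - p := by
            simp [List.length_take, List.length_drop]; omega
          simp [hlen]; omega
      rw [hsA, hsB]
      have hlen : ((cs.drop p).take (k - p)).length = k - p := by
        simp [List.length_take, List.length_drop]; omega
      have hlen2 : ((pieces ++ [(cs.drop p).take (k - p), v.toList]).flatten).length
          = pieces.flatten.length + ((k - p) + v.toList.length) := by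
        simp [hlen]
      have := ih hpt (pieces ++ [(cs.drop p).take (k - p), v.toList]) k hkn
        (by omega)
        (fun x hx => by
          have h2 : pos ≤ x.1 := hhd x hx
          have h3 : (p : Int) ≤ min (max x.1 0) ((cs.length : Int)) :=
            h1 x (List.mem_cons_of_mem _ hx)
          omega)
        (by simp only [List.filter_cons] at hcnt
            rw [if_neg (by simp; omega)] at hcnt
            exact hcnt)
        (fun x hx h2 _ => by
          have h3 : pos ≤ x.1 := hhd x hx
          omega)
      simpa using this

-- ===== VERDICT (by name: the statement is the Claim_ definition above) =====
theorem inject_sequences_py_spec : Claim_unchanged_inject_sequences_py := by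
  intro payload insertions _ hnD
  unfold D_inject_sequences_py at hnD
  unfold inject_sequences_py inject_sequences_py_alt
  congr 1
  have hperm := PySem.List.sorted_perm insertions (fun item => item.1) false
  have hlen := (hperm.filter (fun x => decide (x.1 < 0) && decide (x.2 ≠ ""))).length_eq
  have := pv_inv payload.toList
    (PySem.List.sorted insertions (fun item => item.1) false)
    (PySem.List.sorted_pairwise insertions (fun item => item.1))
    [] 0 (by omega) (by omega)
    (fun x _ => by omega)
    (by omega)
    (fun x _ _ _ => rfl)
  simpa using this

theorem inject_sequences_py_changed : Claim_changed_inject_sequences_py := by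
  unfold Claim_changed_inject_sequences_py; decide
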